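-- pv_equiv track=rewrite | github.com/baiwan-chenhao/rewrite | leetcode_gen_week3.py | solve
-- ===== SOURCE A (Python) =====
-- from typing import List, Tuple
--
-- def solve(nums: List[int]) -> int:
--     seen = set()
--     for i in range(len(nums) - 1, -1, -1):
--         x = nums[i]
--         if x in seen:
--             return i // 3 + 1
--         seen.add(x)
--     return 0
-- ===== SOURCE B (Python) =====
-- from typing import List
--
--
-- def solve(nums: List[int]) -> int:
--     last = {}
--     best = -1
--     for j, x in enumerate(nums):
--         if x in last:
--             prev = last[x]
--             if prev > best:
--                 best = prev
--         last[x] = j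
--     return best // 3 + 1 if best >= 0 else 0
-- ===== Notes on version B (the rewrite author's own statement) =====
-- stated objective: alternative
-- what changed: Replaced the backward early-return scan with a membership set by a single forward pass that keeps a dict of each value's most recent index and a running maximum duplicate index, applying the //3+1 formula once at the end.
import Mathlib
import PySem

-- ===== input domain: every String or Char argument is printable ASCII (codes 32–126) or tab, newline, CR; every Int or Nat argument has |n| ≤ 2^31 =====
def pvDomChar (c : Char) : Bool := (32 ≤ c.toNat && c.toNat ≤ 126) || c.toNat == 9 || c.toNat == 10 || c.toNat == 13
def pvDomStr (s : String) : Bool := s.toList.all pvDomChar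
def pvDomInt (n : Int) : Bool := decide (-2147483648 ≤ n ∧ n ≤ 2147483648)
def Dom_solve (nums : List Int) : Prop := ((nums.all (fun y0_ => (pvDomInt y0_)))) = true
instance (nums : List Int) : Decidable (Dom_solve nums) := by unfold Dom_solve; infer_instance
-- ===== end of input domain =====

-- B replaces A's backward early-return scan (membership set) with one forward pass keeping a
-- last-seen-index dict and a running maximum duplicate index; same result, no speed claim.

-- ===== PORT A =====
-- the loop 'for i in range(len(nums)-1, -1, -1)' with early return, scanning the range list
def solveGoA (nums : List Int) : List Int → PySem.Set Int → Int
  | [], _ => 0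
  | i :: rest, seen =>
    match PySem.List.pyGet? nums i with
    | none => 0  -- unreachable: every i produced by range(len(nums)-1, -1, -1) is in range
    | some x =>
      if seen.contains x then PySem.Int.floordiv i 3 + 1
      else solveGoA nums rest (seen.add x)

def solve (nums : List Int) : Int :=
  solveGoA nums (PySem.List.pyRange ((nums.length : Int) - 1) (-1) (-1)) (PySem.Set.ofList [])

-- ===== PORT B =====
-- one step of B's forward loop: state = (last-seen dict, running best duplicate index)
def solveStepB (st : PySem.Dict Int Int × Int) (jx : Int × Int) : PySem.Dict Int Int × Int :=
  let best' :=
    match st.1.get? jx.2 with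
    | some prev => if prev > st.2 then prev else st.2
    | none => st.2
  (st.1.insert jx.2 jx.1, best')

def solve_alt (nums : List Int) : Int :=
  let st := (PySem.List.enumerate nums).foldl solveStepB (PySem.Dict.empty, -1)
  if st.2 ≥ 0 then PySem.Int.floordiv st.2 3 + 1 else 0

-- ===== PRECONDITION & SPEC =====
def Spec_solve (nums : List Int) (out : Int) : Prop := out = solve_alt nums
instance (nums : List Int) (out : Int) : Decidable (Spec_solve nums out) := by unfold Spec_solve; infer_instance

-- ===== CLAIM (what is proved, stated in full; the proofs are below) =====
def Claim_equal_solve : Prop := ∀ (nums : List Int), Dom_solve nums → Spec_solve nums (solve nums)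

-- ===== LEMMAS AND PROOFS =====

-- reference: scanning list r (the reversed input) left to right with seen-list s, the index
-- (= remaining length) of the first element already seen, else -1
def Nrev : List Int → List Int → Int
  | [], _ => -1
  | x :: r, s => if x ∈ s then (r.length : Int) else Nrev r (x :: s)

-- index (counting from the far end of r) of the first occurrence of x in r, else -1
def Jidx (r : List Int) (x : Int) : Int :=
  if x ∈ r then (r.length : Int) - 1 - (List.idxOf x r : Int) else -1

-- the common post-processing of the best duplicate index
def pyOut (b : Int) : Int := if 0 ≤ b then PySem.Int.floordiv b 3 + 1 else 0

-- descending list [k-1, …, 1, 0] as Ints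
def downFrom : Nat → List Int
  | 0 => []
  | k + 1 => (k : Int) :: downFrom k

theorem Nrev_ge (r : List Int) : ∀ s, -1 ≤ Nrev r s := by
  induction r with
  | nil => intro s; simp [Nrev]
  | cons x r ih =>
    intro s
    simp only [Nrev]
    split
    · omega
    · exact ih _

theorem Nrev_lt (r : List Int) : ∀ s, Nrev r s < (r.length : Int) := by
  induction r with
  | nil => intro s; simp [Nrev]
  | cons x r ih =>
    intro s
    simp only [Nrev, List.length_cons]
    split
    · omega
    · have := ih (x :: s); omega

theorem Nrev_congr (r : List Int) : ∀ s₁ s₂, (∀ a, a ∈ s₁ ↔ a ∈ s₂) → Nrev r s₁ = Nrev r s₂ := by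
  induction r with
  | nil => intro _ _ _; rfl
  | cons x r ih =>
    intro s₁ s₂ h
    simp only [Nrev]
    by_cases hx : x ∈ s₁
    · rw [if_pos hx, if_pos ((h x).1 hx)]
    · rw [if_neg hx, if_neg (fun hc => hx ((h x).2 hc))]
      exact ih _ _ (by intro a; simp [List.mem_cons, h a])

theorem Jidx_lt (r : List Int) (x : Int) : Jidx r x < (r.length : Int) := by
  unfold Jidx
  split
  · have := List.idxOf_lt_length_of_mem (by assumption : x ∈ r); omega
  · omega

theorem Jidx_cons_self (r : List Int) (x : Int) : Jidx (x :: r) x = (r.length : Int) := by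
  simp [Jidx, List.idxOf_cons_self]

theorem Jidx_cons_ne (r : List Int) {x y : Int} (h : y ≠ x) : Jidx (y :: r) x = Jidx r x := by
  unfold Jidx
  by_cases hx : x ∈ r
  · rw [if_pos (by simp [hx]), if_pos hx, List.idxOf_cons_ne _ (by simpa using h)]
    simp only [List.length_cons]
    push_cast
    ring
  · rw [if_neg (by simp [hx, Ne.symm h]), if_neg hx]

theorem Nrev_insert (r : List Int) : ∀ s x, Nrev r (x :: s) = max (Nrev r s) (Jidx r x) := by
  induction r with
  | nil => intro s x; simp [Nrev, Jidx]
  | cons y r ih =>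
    intro s x
    by_cases hyx : y = x
    · subst hyx
      have h1 : Nrev (y :: r) (y :: s) = (r.length : Int) := by simp [Nrev]
      have h2 : Nrev (y :: r) s ≤ (r.length : Int) := by
        simp only [Nrev]
        split
        · omega
        · have := Nrev_lt r (y :: s); omega
      rw [h1, Jidx_cons_self]
      omega
    · by_cases hys : y ∈ s
      · have h1 : Nrev (y :: r) (x :: s) = (r.length : Int) := by
          simp [Nrev, List.mem_cons, hys]
        have h2 : Nrev (y :: r) s = (r.length : Int) := by simp [Nrev, hys]
        have h3 := Jidx_lt (y :: r) x
        rw [h1, h2, Jidx_cons_ne r hyx]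
        have h4 := Jidx_lt r x
        omega
      · have h1 : Nrev (y :: r) (x :: s) = Nrev r (y :: x :: s) := by
          simp [Nrev, List.mem_cons, hys, hyx]
        have h2 : Nrev (y :: r) s = Nrev r (y :: s) := by simp [Nrev, hys]
        rw [h1, h2, Jidx_cons_ne r hyx,
          Nrev_congr r (y :: x :: s) (x :: y :: s) (by intro a; simp [List.mem_cons]; tauto),
          ih (y :: s) x]

theorem downFrom_eq (k : Nat) :
    downFrom k = (List.range k).map (fun j : Nat => (k : Int) - 1 - (j : Int)) := by
  induction k with
  | zero => simp [downFrom]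
  | succ k ih =>
    rw [downFrom, ih, List.range_succ_eq_map, List.map_cons, List.map_map]
    congr 1
    · push_cast; ring
    · apply List.map_congr_left
      intro j _
      simp only [Function.comp_apply]
      push_cast; ring

theorem pyRange_down (k : Nat) :
    PySem.List.pyRange ((k : Int) - 1) (-1) (-1) = downFrom k := by
  rw [downFrom_eq]
  unfold PySem.List.pyRange
  rw [if_neg (by norm_num)]
  rcases Nat.eq_zero_or_pos k with hk | hk
  · subst hk; norm_num
  · have hlt : (-1 : Int) < (k : Int) - 1 := by omega
    rw [if_neg (by norm_num), if_pos hlt]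
    have hc : (((k : Int) - 1 - -1 + - -1 - 1) / - -1).toNat = k := by
      norm_num
    rw [hc]
    dsimp only
    apply List.map_congr_left
    intro j _
    ring

-- the A-side loop computes pyOut of the reference Nrev
theorem solveGoA_eq (nums : List Int) :
    ∀ (k : Nat), k ≤ nums.length → ∀ (seen : PySem.Set Int) (s : List Int),
      (∀ a, a ∈ seen ↔ a ∈ s) →
      solveGoA nums (downFrom k) seen = pyOut (Nrev (nums.take k).reverse s) := by
  intro k
  induction k generalizing nums with
  | zero => intro _ seen s _; simp [downFrom, solveGoA, Nrev, pyOut]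
  | succ k ih =>
    intro hk seen s hs
    have hklt : k < nums.length := by omega
    rw [downFrom]
    simp only [solveGoA, PySem.List.pyGet?_natCast, List.getElem?_eq_getElem hklt]
    have htake : (nums.take (k + 1)).reverse = nums[k] :: (nums.take k).reverse := by
      rw [List.take_add_one, List.getElem?_eq_getElem hklt]
      simp
    rw [htake]
    have hcont : seen.contains nums[k] = true ↔ nums[k] ∈ s := by
      simp only [PySem.Set.contains, List.contains_iff_mem]; exact hs _
    by_cases hmem : nums[k] ∈ s
    · rw [if_pos (hcont.2 hmem)]
      simp only [Nrev, if_pos hmem, List.length_reverse, List.length_take,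
        Nat.min_eq_left (Nat.le_of_lt hklt)]
      simp [pyOut]
    · rw [if_neg (by rw [hcont]; exact hmem)]
      simp only [Nrev, if_neg hmem]
      exact ih nums (Nat.le_of_lt hklt) _ _
        (by intro a; rw [PySem.Set.mem_add]; simp [List.mem_cons, hs a]; tauto)

theorem solve_eq_pyOut (nums : List Int) : solve nums = pyOut (Nrev nums.reverse []) := by
  unfold solve
  rw [pyRange_down nums.length]
  have := solveGoA_eq nums nums.length (le_refl _) (PySem.Set.ofList []) []
    (by intro a; rw [PySem.Set.mem_ofList])
  simpa using this

-- B-side: enumerate distributes over a final append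
theorem enumerate_append_singleton (x : Int) :
    ∀ (xs : List Int) (k : Int),
      PySem.List.enumerate (xs ++ [x]) k
        = PySem.List.enumerate xs k ++ [(k + (xs.length : Int), x)] := by
  intro xs
  induction xs with
  | nil => intro k; simp [PySem.List.enumerate]
  | cons y ys ih =>
    intro k
    have harith : k + 1 + (ys.length : Int) = k + ((ys.length + 1 : Nat) : Int) := by
      push_cast; ring
    simp only [List.cons_append, PySem.List.enumerate, ih (k + 1), List.length_cons, harith]

-- the B-side fold state characterised: dict = last-seen indices, best = Nrev of the reverse
theorem foldB_eq (nums : List Int) :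
    (∀ v, ((PySem.List.enumerate nums).foldl solveStepB (PySem.Dict.empty, -1)).1.get? v
        = (if v ∈ nums.reverse then some (Jidx nums.reverse v) else none)) ∧
    ((PySem.List.enumerate nums).foldl solveStepB (PySem.Dict.empty, -1)).2
        = Nrev nums.reverse [] := by
  induction nums using List.reverseRecOn with
  | nil => simp [PySem.List.enumerate, Nrev, PySem.Dict.empty, PySem.Dict.get?]
  | append_singleton ys x ih =>
    obtain ⟨ihd, ihb⟩ := ih
    rw [enumerate_append_singleton x ys 0, List.foldl_append]
    simp only [List.foldl_cons, List.foldl_nil, zero_add]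
    set st := (PySem.List.enumerate ys).foldl solveStepB (PySem.Dict.empty, -1) with hst
    have hrev : (ys ++ [x]).reverse = x :: ys.reverse := by simp
    have hbge : -1 ≤ st.2 := ihb ▸ Nrev_ge _ _
    constructor
    · intro v
      simp only [solveStepB, hrev]
      by_cases hvx : v = x
      · subst hvx
        rw [PySem.Dict.get?_insert_self]
        rw [if_pos (by simp), Jidx_cons_self]
        simp
      · rw [PySem.Dict.get?_insert_of_ne _ _ hvx, ihd v, Jidx_cons_ne _ (Ne.symm hvx)]
        simp [List.mem_cons, hvx]
    · have hkey : Nrev (x :: ys.reverse) [] = max (Nrev ys.reverse []) (Jidx ys.reverse x) := by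
        simp only [Nrev, List.not_mem_nil, if_false]
        exact Nrev_insert ys.reverse [] x
      simp only [solveStepB, hrev]
      rw [ihd x]
      by_cases hx : x ∈ ys.reverse
      · rw [if_pos hx]
        dsimp only
        rw [hkey, ihb]
        have := Jidx_lt ys.reverse x
        split_ifs <;> omega
      · rw [if_neg hx]
        dsimp only
        have hJ : Jidx ys.reverse x = -1 := by simp [Jidx, hx]
        rw [hkey, hJ, ihb]
        have := Nrev_ge ys.reverse ([] : List Int)
        omega

theorem solve_alt_eq_pyOut (nums : List Int) : solve_alt nums = pyOut (Nrev nums.reverse []) := by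
  have hb := (foldB_eq nums).2
  simp only [solve_alt, pyOut, hb, ge_iff_le]

-- ===== VERDICT (by name: the statement is the Claim_ definition above) =====
theorem solve_spec : Claim_equal_solve := by
  intro nums _
  unfold Spec_solve
  rw [solve_eq_pyOut, solve_alt_eq_pyOut]
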